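-- pv_equiv track=rewrite | github.com/Megigi7/Python | saltos.py | datos_saltadores_para_tabla
-- ===== SOURCE A (Python) =====
-- def datos_saltadores_para_tabla(lista_saltadores): # ← SALTADORES
--     competi_nombre =[]; competi_apellido = []; competi_ranking = []
--     for i in lista_saltadores:
--         competi_nombre.append(i[0])
--         competi_apellido.append(i[1])
--         competi_ranking.append(i[3])
--     datos = [competi_nombre, competi_apellido, competi_ranking]
--     return datos
-- ===== SOURCE B (Python) =====
-- def columna(lista, j):
--     return [fila[j] for fila in lista]
--
-- def datos_saltadores_para_tabla(lista_saltadores): # ← SALTADORES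
--     return [columna(lista_saltadores, j) for j in (0, 1, 3)]
-- ===== Notes on version B (the rewrite author's own statement) =====
-- stated objective: simpler
-- what changed: Replaces the single pass with three growing accumulator lists by three independent staged passes: a columna(lista, j) helper extracts one whole column, called once for each of the indices (0, 1, 3).
import Mathlib
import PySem

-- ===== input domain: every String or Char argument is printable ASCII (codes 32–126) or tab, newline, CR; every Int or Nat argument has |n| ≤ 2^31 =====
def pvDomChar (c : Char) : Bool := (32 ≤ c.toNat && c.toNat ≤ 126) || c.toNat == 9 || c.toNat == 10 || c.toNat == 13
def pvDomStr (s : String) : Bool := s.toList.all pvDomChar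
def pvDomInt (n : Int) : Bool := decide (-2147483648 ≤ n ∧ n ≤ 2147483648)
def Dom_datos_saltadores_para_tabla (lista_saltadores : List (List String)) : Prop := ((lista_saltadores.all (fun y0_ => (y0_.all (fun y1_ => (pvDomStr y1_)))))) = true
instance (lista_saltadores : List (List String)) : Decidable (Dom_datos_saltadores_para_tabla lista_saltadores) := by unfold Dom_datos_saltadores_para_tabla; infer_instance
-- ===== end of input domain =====

-- B is simpler: instead of one pass maintaining three accumulator lists, a helper extracts one whole column, called once per wanted index (0, 1, 3); return-value equivalence on rows with ≥ 4 fields.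


-- ===== PORT A =====
-- one pass; three accumulator lists appended to row by row; i[k] via pyGet? (Pre_ keeps indexing in range)
def datos_saltadores_para_tabla (lista_saltadores : List (List String)) : List (List String) :=
  let s := lista_saltadores.foldl
    (fun (acc : List String × List String × List String) i =>
      (acc.1 ++ [(PySem.List.pyGet? i 0).getD ""],
       acc.2.1 ++ [(PySem.List.pyGet? i 1).getD ""],
       acc.2.2 ++ [(PySem.List.pyGet? i 3).getD ""]))
    ([], [], [])
  [s.1, s.2.1, s.2.2]

-- ===== PORT B =====
-- columna(lista, j) = [fila[j] for fila in lista]; fila[j] via pyGet? (in range under Pre_)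
def columna (lista : List (List String)) (j : Int) : List String :=
  lista.map (fun fila => (PySem.List.pyGet? fila j).getD "")

def datos_saltadores_para_tabla_alt (lista_saltadores : List (List String)) : List (List String) :=
  [(0 : Int), 1, 3].map (fun j => columna lista_saltadores j)

-- ===== PRECONDITION & SPEC =====
-- Pre_ excludes exactly the ragged inputs (a row with fewer than 4 fields), on which Python A raises IndexError.
def Pre_datos_saltadores_para_tabla (lista_saltadores : List (List String)) : Prop :=
  ∀ r ∈ lista_saltadores, 4 ≤ r.length
instance (lista_saltadores : List (List String)) : Decidable (Pre_datos_saltadores_para_tabla lista_saltadores) := by unfold Pre_datos_saltadores_para_tabla; infer_instance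

def pvWitness_datos_saltadores_para_tabla : List (List String) :=
  [["Ana", "Lopez", "ES", "1"], ["Bea", "Diaz", "FR", "2"]]

def Spec_datos_saltadores_para_tabla (lista_saltadores : List (List String)) (out : List (List String)) : Prop := out = datos_saltadores_para_tabla_alt lista_saltadores
instance (lista_saltadores : List (List String)) (out : List (List String)) : Decidable (Spec_datos_saltadores_para_tabla lista_saltadores out) := by unfold Spec_datos_saltadores_para_tabla; infer_instance

-- ===== CLAIM (what is proved, stated in full; the proofs are below) =====
def Claim_equal_datos_saltadores_para_tabla : Prop := ∀ (lista_saltadores : List (List String)), Dom_datos_saltadores_para_tabla lista_saltadores → Pre_datos_saltadores_para_tabla lista_saltadores → Spec_datos_saltadores_para_tabla lista_saltadores (datos_saltadores_para_tabla lista_saltadores)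

-- ===== LEMMAS AND PROOFS =====

-- A's fold appends exactly the three column maps to the accumulators
theorem foldA_char (l : List (List String)) (a b c : List String) :
    l.foldl
      (fun (acc : List String × List String × List String) i =>
        (acc.1 ++ [(PySem.List.pyGet? i 0).getD ""],
         acc.2.1 ++ [(PySem.List.pyGet? i 1).getD ""],
         acc.2.2 ++ [(PySem.List.pyGet? i 3).getD ""]))
      (a, b, c)
    = (a ++ l.map (fun r => (PySem.List.pyGet? r 0).getD ""),
       b ++ l.map (fun r => (PySem.List.pyGet? r 1).getD ""),
       c ++ l.map (fun r => (PySem.List.pyGet? r 3).getD "")) := by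
  induction l generalizing a b c with
  | nil => simp
  | cons x xs ih => simp [List.foldl, ih]

-- ===== VERDICT (by name: the statement is the Claim_ definition above) =====
theorem datos_saltadores_para_tabla_spec : Claim_equal_datos_saltadores_para_tabla := by
  intro l _ _
  unfold Spec_datos_saltadores_para_tabla datos_saltadores_para_tabla datos_saltadores_para_tabla_alt columna
  simp [foldA_char]
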